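/- GENERATED by farm/mkstatement.py from design/units.tsv (unit `vorbis_decode_packet_rest.3c`) and the assertions of Vorbis/Spec/PacketRest3.lean — do not edit.
   THE STATEMENT of the proof unit `vorbis_decode_packet_rest.3c`: segment 3c of `vorbis_decode_packet_rest` (17 instructions; entries 0x110fc2;
   exits 0x110d0a; ranges 0x110e60-0x110e6f + 0x110fc2-0x110ffb)
   takes each of its entry assertions to one of its exit assertions (`Vorbis.Spec.vorbis_decode_packet_rest.Seg3c`), given the contracts of its callees.
   What the names mean: Vorbis/Spec/Basic.lean (the shared hypotheses), Vorbis/Spec/PacketRest3.lean (the assertions). The theorem to prove: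
   `theorem vorbis_decode_packet_rest_3c_ok : Vorbis.Spec.vorbis_decode_packet_rest_3c.Statement`. -/
import Vorbis.Spec.PacketRest3
namespace Vorbis.Spec.vorbis_decode_packet_rest_3c
open X86 X86.User Asan

/-- The statement of unit `vorbis_decode_packet_rest.3c`. -/
def Statement : Prop :=
  ∀ (Lay : Layout) (_hLay : Lay.hi = 0x1000000) (μ : Microarch) (_hμ : UserX.MicroOK μ) (u₀ : State)
    (_hcode : HasCodeNat Lay u₀ Vorbis.L.vorbis_decode_packet_rest.entry Vorbis.Code.code_vorbis_decode_packet_rest.nat Vorbis.L.vorbis_decode_packet_rest.size)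
    (_h_asan_load1_noabort : Asan.SmallCheck Lay μ Vorbis.WayInv (Vorbis.CodeOK u₀) [.rax, .rdx] 1 Vorbis.L.__asan_load1_noabort.entry)
    (_h_asan_load8_noabort : Asan.SmallCheck Lay μ Vorbis.WayInv (Vorbis.CodeOK u₀) [.rax, .rcx, .rdx] 8 Vorbis.L.__asan_load8_noabort.entry)
    (_h_asan_load4_noabort : Asan.SmallCheck Lay μ Vorbis.WayInv (Vorbis.CodeOK u₀) [.rax, .rcx, .rdx] 4 Vorbis.L.__asan_load4_noabort.entry),
    Vorbis.Spec.vorbis_decode_packet_rest.Seg3c Lay μ u₀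

end Vorbis.Spec.vorbis_decode_packet_rest_3c
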